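-- pv_equiv track=rewrite | github.com/eduardgg/practice | leetcode/top_interview_medium/sorting_and_searching/searchInSortedMatrix.py | lastLessThan
-- ===== SOURCE A (Python) =====
-- def lastLessThan(vector, target):
--     # Retorna l'índex de l'últim element del vector
--     # estrictament menor al target.
--     low = 0
--     high = len(vector) - 1
--     if vector[low] >= target:
--         return low-1
--     if vector[high] < target:
--         return high
--     if len(vector) == 2:
--         return low
--     med = (low + high) // 2
--     if vector[med] >= target:
--         return lastLessThan(vector[:med], target)
--     return med + lastLessThan(vector[med:], target)
-- ===== SOURCE B (Python) =====
-- def lastLessThan(vector, target):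
--     # Index of the last element strictly less than target:
--     # iterative index-based search on a [lo, hi] window, no slicing, no recursion.
--     lo, hi = 0, len(vector) - 1
--     while True:
--         if vector[lo] >= target:
--             return lo - 1
--         if vector[hi] < target:
--             return hi
--         if hi - lo == 1:
--             return lo
--         med = lo + (hi - lo) // 2
--         if vector[med] >= target:
--             hi = med - 1
--         else:
--             lo = med
-- ===== Notes on version B (the rewrite author's own statement) =====
-- stated objective: alternative
-- what changed: Replaced A's recursion that copies a list slice at every step with an iterative index-based search that moves two window bounds over the original list (no list copies, no recursion); intended as faster, measured only 1.33x at the largest size.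
import Mathlib
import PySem

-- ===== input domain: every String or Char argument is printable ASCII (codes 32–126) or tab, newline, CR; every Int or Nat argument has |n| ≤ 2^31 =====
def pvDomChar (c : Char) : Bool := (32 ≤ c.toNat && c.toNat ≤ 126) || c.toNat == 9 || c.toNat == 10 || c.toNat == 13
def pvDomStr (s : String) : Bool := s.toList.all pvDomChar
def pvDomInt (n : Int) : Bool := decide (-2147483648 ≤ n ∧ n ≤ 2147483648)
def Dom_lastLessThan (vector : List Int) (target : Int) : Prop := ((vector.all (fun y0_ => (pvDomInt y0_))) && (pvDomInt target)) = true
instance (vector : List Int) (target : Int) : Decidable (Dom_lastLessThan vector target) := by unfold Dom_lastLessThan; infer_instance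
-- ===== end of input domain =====

-- B replaces A's recursion that copies a list slice at every step by an iterative index-based
-- search moving two window bounds over the original list (no copies, no recursion).

-- ===== PORT A =====
-- fuel only makes the recursion total; on every nonempty vector the Python recursion
-- terminates and fuel = length + 1 is never exhausted.
def lastLessThanAux (fuel : Nat) (vector : List Int) (target : Int) : Int :=
  match fuel with
  | 0 => 0
  | fuel + 1 =>
    let low : Int := 0
    let high : Int := (vector.length : Int) - 1
    -- vector[low] / vector[high] / vector[med]: Python raises IndexError on [] (excluded by Pre_);
    -- the .getD 0 default is never reached inside Pre_
    if (PySem.List.pyGet? vector low).getD 0 ≥ target then low - 1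
    else if (PySem.List.pyGet? vector high).getD 0 < target then high
    else if vector.length = 2 then low
    else
      let med : Int := PySem.Int.floordiv (low + high) 2
      if (PySem.List.pyGet? vector med).getD 0 ≥ target then
        lastLessThanAux fuel (PySem.List.slice vector none (some med)) target
      else
        med + lastLessThanAux fuel (PySem.List.slice vector (some med) none) target

def lastLessThan (vector : List Int) (target : Int) : Int :=
  lastLessThanAux (vector.length + 1) vector target

-- ===== PORT B =====
-- the 'while True' loop of Source B, lo and hi as Nat window bounds (both stay ≥ 0);
-- fuel only makes the loop total: inside Pre_ the window shrinks and fuel is never exhausted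
def bLoopAux (fuel : Nat) (vector : List Int) (target : Int) (lo hi : Nat) : Int :=
  match fuel with
  | 0 => 0
  | fuel + 1 =>
    if vector.getD lo 0 ≥ target then (lo : Int) - 1
    else if vector.getD hi 0 < target then (hi : Int)
    else if hi - lo = 1 then (lo : Int)
    else
      let med := lo + (hi - lo) / 2
      if vector.getD med 0 ≥ target then bLoopAux fuel vector target lo (med - 1)
      else bLoopAux fuel vector target med hi

def lastLessThan_alt (vector : List Int) (target : Int) : Int :=
  bLoopAux (vector.length + 1) vector target 0 (vector.length - 1)

-- ===== PRECONDITION & SPEC =====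
-- Pre_ excludes exactly the empty vector, on which A raises IndexError (vector[0]).
def Pre_lastLessThan (vector : List Int) (target : Int) : Prop := vector ≠ []
instance (vector : List Int) (target : Int) : Decidable (Pre_lastLessThan vector target) := by
  unfold Pre_lastLessThan; infer_instance

def pvWitness_lastLessThan : List Int × Int := ([1, 2, 2, 5], 3)

def Spec_lastLessThan (vector : List Int) (target : Int) (out : Int) : Prop := out = lastLessThan_alt vector target
instance (vector : List Int) (target : Int) (out : Int) : Decidable (Spec_lastLessThan vector target out) := by unfold Spec_lastLessThan; infer_instance

-- ===== CLAIM (what is proved, stated in full; the proofs are below) =====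
def Claim_equal_lastLessThan : Prop := ∀ (vector : List Int) (target : Int), Dom_lastLessThan vector target → Pre_lastLessThan vector target → Spec_lastLessThan vector target (lastLessThan vector target)

-- ===== LEMMAS AND PROOFS =====

-- A on the window vector[lo:hi+1] computes B's window step shifted back by lo
theorem window_eq (v : List Int) (t : Int) :
    ∀ (fuel lo hi : Nat), lo ≤ hi → hi < v.length → hi - lo + 1 ≤ fuel →
      lastLessThanAux fuel ((v.drop lo).take (hi - lo + 1)) t = bLoopAux fuel v t lo hi - lo := by
  intro fuel
  induction fuel with
  | zero => intro lo hi h1 h2 h3; omega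
  | succ fuel ih =>
    intro lo hi h1 h2 h3
    set w := (v.drop lo).take (hi - lo + 1) with hw
    have hlenw : w.length = hi - lo + 1 := by
      rw [hw]; simp; omega
    have hwj : ∀ j, j < hi - lo + 1 → w.getD j 0 = v.getD (lo + j) 0 := by
      intro j hj
      rw [hw, List.getD_eq_getElem _ 0 (by simp; omega), List.getElem_take, List.getElem_drop,
        List.getD_eq_getElem _ 0 (by omega)]
    -- the three reads A performs, expressed as B's reads of the original list
    have e0 : (PySem.List.pyGet? w 0).getD 0 = v.getD lo 0 := by
      rw [PySem.List.pyGet?_zero, ← List.getD_eq_getElem?_getD, hwj 0 (by omega), Nat.add_zero]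
    have e1 : (PySem.List.pyGet? w ((w.length : Int) - 1)).getD 0 = v.getD hi 0 := by
      rw [show PySem.List.pyGet? w ((w.length : Int) - 1) = w[((w.length : Int) - 1).toNat]? from
          PySem.List.pyGet?_of_nonneg w (by rw [hlenw]; omega),
        ← List.getD_eq_getElem?_getD,
        show ((w.length : Int) - 1).toNat = hi - lo from by rw [hlenw]; omega,
        hwj (hi - lo) (by omega), show lo + (hi - lo) = hi from by omega]
    rw [lastLessThanAux, bLoopAux]
    simp only [e0, zero_add]
    by_cases c1 : v.getD lo 0 ≥ t
    · rw [if_pos c1, if_pos c1]; omega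
    · rw [if_neg c1, if_neg c1]
      simp only [e1]
      by_cases c2 : v.getD hi 0 < t
      · rw [if_pos c2, if_pos c2, hlenw]; omega
      · rw [if_neg c2, if_neg c2]
        by_cases c3 : hi - lo = 1
        · rw [if_pos (by rw [hlenw]; omega), if_pos c3]; omega
        · rw [if_neg (by rw [hlenw]; omega), if_neg c3]
          have hge2 : 2 ≤ hi - lo := by
            rcases Nat.lt_or_ge (hi - lo) 2 with hc | hc
            · have he : lo = hi := by omega
              rw [he] at c1
              omega
            · exact hc
          -- the midpoint: A's relative med is mr, B's absolute med is lo + mr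
          set mr : Nat := (hi - lo) / 2 with hmr
          have hmr1 : 1 ≤ mr := by omega
          have hmr2 : mr ≤ hi - lo - 1 := by omega
          have hmed : PySem.Int.floordiv ((w.length : Int) - 1) 2 = (mr : Int) := by
            rw [show ((w.length : Int) - 1) = ((hi - lo : Nat) : Int) from by rw [hlenw]; omega]
            exact_mod_cast PySem.Int.floordiv_natCast (hi - lo) 2
          simp only [hmed]
          have e2 : (PySem.List.pyGet? w (mr : Int)).getD 0 = v.getD (lo + mr) 0 := by
            rw [PySem.List.pyGet?_natCast, ← List.getD_eq_getElem?_getD, hwj mr (by omega)]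
          simp only [e2]
          by_cases c4 : v.getD (lo + mr) 0 ≥ t
          · rw [if_pos c4, if_pos c4]
            -- A recurses on the prefix slice = the window [lo, lo + mr - 1]
            rw [PySem.List.slice_to_natCast w mr, hw, List.take_take,
              show min mr (hi - lo + 1) = (lo + mr - 1) - lo + 1 from by omega]
            rw [ih lo (lo + mr - 1) (by omega) (by omega) (by omega)]
          · rw [if_neg c4, if_neg c4]
            -- A recurses on the suffix slice = the window [lo + mr, hi]
            rw [PySem.List.slice_from_natCast w mr, hw, List.drop_take, List.drop_drop,
              show hi - lo + 1 - mr = hi - (lo + mr) + 1 from by omega]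
            rw [ih (lo + mr) hi (by omega) (by omega) (by omega)]
            omega

-- ===== VERDICT (by name: the statement is the Claim_ definition above) =====
theorem lastLessThan_spec : Claim_equal_lastLessThan := by
  intro vector target _hdom hpre
  unfold Spec_lastLessThan lastLessThan lastLessThan_alt
  have hlen : 1 ≤ vector.length := List.length_pos_of_ne_nil hpre
  have h := window_eq vector target (vector.length + 1) 0 (vector.length - 1)
    (by omega) (by omega) (by omega)
  rw [List.drop_zero, show vector.length - 1 - 0 + 1 = vector.length from by omega,
    List.take_length] at h
  omega
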